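-- pv_equiv track=rewrite | github.com/geoapi/topics-indexing | mymodule.py | check_bdsl_string
-- ===== SOURCE A (Python) =====
-- def check_bdsl_string(dsl_string):
--     dsl_string = dsl_string.split(' ')
--     #prepare a bare-list of api names and another for topic names so we can match
--     topic_dict_temp = []
--     api_dict_temp = []
--     topic_name = []
--     api_name = []
--     for item in api_dict:
--         if item['name']:
--           api_dict_temp.append(item['name'].lower())
--         for key in item['keywords']:
--            if key:
--                api_dict_temp.append(key.lower())
--     topics_dict_temp = []
--     for item in topic_dict:
--         topics_dict_temp.append(item['name'].lower())
--         for key in item['keywords']: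
--             if key:
--                 topics_dict_temp.append(key.lower())
--     not_included_dict = []
--     for one_item in dsl_string:
--         user_keyword = ''.join(filter(str.isalnum,one_item))
--         operator = one_item[0]
--         if (user_keyword in topics_dict_temp and operator == '/'):
--             topic_name.append(user_keyword)
--         if (user_keyword in api_dict_temp and operator == '/'):
--             api_name.append(user_keyword)
--         if (operator == '-'):
--             not_included_dict.append(user_keyword)
--
--     return(topic_name,api_name,not_included_dict)
--
-- api_dict = [
--              {"name":"facebook","keywords":["facebook graph api", "facebook API", "facebook api", "FB API", "fb api"],"tag":"facebook-graph-api"},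
--              {"name":"twitter", "keywords":["twitter api", "Twitter API"], "tag":"twitter-api"},
--              {"name":"winapi","keywords":["Winapi","win api", "WINAPI", "win32 api", "Windows API","The Windows API"],"tag":"winapi"},
--              {"name":"gmail", "keywords":["Google GMail api", "Gmail API"], "tag":"gmail-api"},
--              {"name":"java", "keywords":["Java api", "Java API"], "tag":"java-api"},
--              {"name": "youtube", "keywords": ["YouTube API"], "tag": "youtube-api"},
--              {"name": "googleplaces", "keywords": ["Google Places API"], "tag": "google-places-api"},
--              {"name": "instagram", "keywords": ["instagram api","Instagram API"], "tag": "instagram-api"},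
--               {"name": "youtube", "keywords": ["youtube api"], "tag": "youtube-api"},
--              {"name": "", "keywords": [""], "tag": ""},
--              {"name": "googlecalendar", "keywords": ["google calendar api"], "tag": "google-calendar-api"},
--               {"name": "dropbox", "keywords": ["dropbox api"], "tag": "dropbox-api"},
--               {"name": "slack", "keywords": ["slack api"], "tag": "slack-api"},
--               {"name": "heresdk", "keywords": ["HERE sdk"], "tag": "here-api"},
--              # {"name": "", "keywords": [""], "tag": ""},
--              # {"name": "", "keywords": [""], "tag": ""},
--              # {"name": "", "keywords": [""], "tag": ""},
--              # {"name": "", "keywords": [""], "tag": ""},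
--              # {"name": "", "keywords": [""], "tag": ""},
--              # {"name": "", "keywords": [""], "tag": ""},
--              # {"name": "", "keywords": [""], "tag": ""},
--              # {"name": "", "keywords": [""], "tag": ""},
--              # {"name": "", "keywords": [""], "tag": ""},
--              # {"name": "", "keywords": [""], "tag": ""},
--              # {"name": "", "keywords": [""], "tag": ""},
--              # {"name": "", "keywords": [""], "tag": ""},
--              # {"name": "", "keywords": [""], "tag": ""},
--              # {"name": "", "keywords": [""], "tag": ""},
--
--             ]
--
-- topic_dict = [
--     {"id":0,"name":"API security","category_id":0, "keywords":["security"]},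
--     {"id":1,"name":"oauth configuration","category_id":0,"keywords":["oauth","authentication","configuration","settings"]},
--     {"id":2,"name":"oauth clarification","category_id":0,"keywords":["oauth"]}, #,"understand","clarify" take out as they are not necessarly related to oauth
--     {"id":3,"name":"api constraints","category_id":1,"keywords":["restrictions"]},
--     {"id":4,"name":"possibility of a functionality","category_id":1,"keywords":["possible","feasible","doable"]},
--     {"id":5,"name":"understanding usage limitation","category_id":1,"keywords":["limited","restricted","impossible"]},
--     {"id":6,"name":"debugging","category_id":2,"keywords":["debug","fix","error","bug"]},
--     {"id":7,"name":"request","category_id":2,"keywords":["request","call","invocation"]},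
--     {"id":8,"name":"behaviour","category_id":2,"keywords":["behaviour"]},
--     {"id":9,"name":"parameters","category_id":2,"keywords":["param","parameter"]},
--     {"id":10,"name":"returned data","category_id":2,"keywords":["returned","requested","data"]},
--     {"id":11,"name":"settings","category_id":3,"keywords":["settings","configuration"]},
--     {"id":12,"name":"usage","category_id":4,"keywords":["usage","use","example"]},
--     #{"id":13,"name":"features implementation feasibility","category_id":4,"parent":false,"keywords":["feature","feasible","possible"]},
--     {"id":14,"name":"understanding functionality","category_id":4,"keywords":["how to","need to","know"]},
--     {"id":15,"name":"seeking alternative implementation","category_id":4,"keywords":["alternative","way","another"]},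
--     {"id":16,"name":"development environment","category_id":4,"keywords":["environment","development","development-mode"]},
--     {"id":17,"name":"examples","category_id":4,"keywords":["example","code"]},
--     {"id":18,"name":"documentation","category_id":5,"keywords":["documentation","docs","reference"]},
--     {"id":19,"name":"redirection","category_id":5,"keywords":["redirect"]},
--     {"id":20,"name":"reporting issues","category_id":5,"keywords":["typo","mistake","error"]},
--     {"id":21,"name":"definition","category_id":6,"keywords":["definition"]},
--     {"id":22,"name":"design patterns","category_id":6,"keywords":["design","design-pattern","design-patterns"]},
--     {"id":23,"name":"version management","category_id":6,"keywords":["version"]},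
--     {"id":24,"name":"setting parameters","category_id":6,"keywords":["setting","parameter"]},
--     {"id":25,"name":"recommendation","category_id":6,"keywords":["recommend"]}
--     ]
-- ===== SOURCE B (Python) =====
-- # B: single pass over the tokens; no pre-built flat keyword lists -- each token is
-- # matched by scanning topic_dict / api_dict directly with a short-circuiting any().
-- def check_bdsl_string(dsl_string):
--     topic_name = []
--     api_name = []
--     not_included_dict = []
--     for one_item in dsl_string.split(' '):
--         user_keyword = ''.join(filter(str.isalnum, one_item))
--         operator = one_item[0]
--         if operator == '/':
--             if any(user_keyword == item['name'].lower()
--                    or any(k and user_keyword == k.lower() for k in item['keywords'])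
--                    for item in topic_dict):
--                 topic_name.append(user_keyword)
--             if any((item['name'] and user_keyword == item['name'].lower())
--                    or any(k and user_keyword == k.lower() for k in item['keywords'])
--                    for item in api_dict):
--                 api_name.append(user_keyword)
--         elif operator == '-':
--             not_included_dict.append(user_keyword)
--     return (topic_name, api_name, not_included_dict)
--
-- api_dict = [
--              {"name":"facebook","keywords":["facebook graph api", "facebook API", "facebook api", "FB API", "fb api"],"tag":"facebook-graph-api"},
--              {"name":"twitter", "keywords":["twitter api", "Twitter API"], "tag":"twitter-api"},
--              {"name":"winapi","keywords":["Winapi","win api", "WINAPI", "win32 api", "Windows API","The Windows API"],"tag":"winapi"},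
--              {"name":"gmail", "keywords":["Google GMail api", "Gmail API"], "tag":"gmail-api"},
--              {"name":"java", "keywords":["Java api", "Java API"], "tag":"java-api"},
--              {"name": "youtube", "keywords": ["YouTube API"], "tag": "youtube-api"},
--              {"name": "googleplaces", "keywords": ["Google Places API"], "tag": "google-places-api"},
--              {"name": "instagram", "keywords": ["instagram api","Instagram API"], "tag": "instagram-api"},
--               {"name": "youtube", "keywords": ["youtube api"], "tag": "youtube-api"},
--              {"name": "", "keywords": [""], "tag": ""},
--              {"name": "googlecalendar", "keywords": ["google calendar api"], "tag": "google-calendar-api"},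
--               {"name": "dropbox", "keywords": ["dropbox api"], "tag": "dropbox-api"},
--               {"name": "slack", "keywords": ["slack api"], "tag": "slack-api"},
--               {"name": "heresdk", "keywords": ["HERE sdk"], "tag": "here-api"},
--             ]
--
-- topic_dict = [
--     {"id":0,"name":"API security","category_id":0, "keywords":["security"]},
--     {"id":1,"name":"oauth configuration","category_id":0,"keywords":["oauth","authentication","configuration","settings"]},
--     {"id":2,"name":"oauth clarification","category_id":0,"keywords":["oauth"]},
--     {"id":3,"name":"api constraints","category_id":1,"keywords":["restrictions"]},
--     {"id":4,"name":"possibility of a functionality","category_id":1,"keywords":["possible","feasible","doable"]},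
--     {"id":5,"name":"understanding usage limitation","category_id":1,"keywords":["limited","restricted","impossible"]},
--     {"id":6,"name":"debugging","category_id":2,"keywords":["debug","fix","error","bug"]},
--     {"id":7,"name":"request","category_id":2,"keywords":["request","call","invocation"]},
--     {"id":8,"name":"behaviour","category_id":2,"keywords":["behaviour"]},
--     {"id":9,"name":"parameters","category_id":2,"keywords":["param","parameter"]},
--     {"id":10,"name":"returned data","category_id":2,"keywords":["returned","requested","data"]},
--     {"id":11,"name":"settings","category_id":3,"keywords":["settings","configuration"]},
--     {"id":12,"name":"usage","category_id":4,"keywords":["usage","use","example"]},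
--     {"id":14,"name":"understanding functionality","category_id":4,"keywords":["how to","need to","know"]},
--     {"id":15,"name":"seeking alternative implementation","category_id":4,"keywords":["alternative","way","another"]},
--     {"id":16,"name":"development environment","category_id":4,"keywords":["environment","development","development-mode"]},
--     {"id":17,"name":"examples","category_id":4,"keywords":["example","code"]},
--     {"id":18,"name":"documentation","category_id":5,"keywords":["documentation","docs","reference"]},
--     {"id":19,"name":"redirection","category_id":5,"keywords":["redirect"]},
--     {"id":20,"name":"reporting issues","category_id":5,"keywords":["typo","mistake","error"]},
--     {"id":21,"name":"definition","category_id":6,"keywords":["definition"]},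
--     {"id":22,"name":"design patterns","category_id":6,"keywords":["design","design-pattern","design-patterns"]},
--     {"id":23,"name":"version management","category_id":6,"keywords":["version"]},
--     {"id":24,"name":"setting parameters","category_id":6,"keywords":["setting","parameter"]},
--     {"id":25,"name":"recommendation","category_id":6,"keywords":["recommend"]}
--     ]
-- ===== Notes on version B (the rewrite author's own statement) =====
-- stated objective: alternative
-- what changed: B does not build A's flat lowercased keyword lists (topics_dict_temp/api_dict_temp) at all; it matches each token by scanning topic_dict and api_dict directly with short-circuiting any() over entries and their nonempty keywords, branching once on the operator.
import Mathlib
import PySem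

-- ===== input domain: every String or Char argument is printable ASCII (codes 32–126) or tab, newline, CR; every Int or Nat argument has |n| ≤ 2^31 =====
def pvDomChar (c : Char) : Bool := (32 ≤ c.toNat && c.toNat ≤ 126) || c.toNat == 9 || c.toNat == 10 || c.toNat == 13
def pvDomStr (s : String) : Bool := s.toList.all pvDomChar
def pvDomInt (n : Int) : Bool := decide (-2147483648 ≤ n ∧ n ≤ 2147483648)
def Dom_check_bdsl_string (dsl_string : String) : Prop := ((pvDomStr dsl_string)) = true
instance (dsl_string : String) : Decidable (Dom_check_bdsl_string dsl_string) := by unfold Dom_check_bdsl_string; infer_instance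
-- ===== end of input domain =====

-- B drops A's pre-built flat keyword lists and instead matches each token by scanning the
-- config dicts directly (same return value; objective: alternative decomposition, not speed).

-- Module constants api_dict / topic_dict: only the fields A reads (name, keywords) are kept.
def apiDict : List (String × List String) :=
[
  ("facebook", ["facebook graph api", "facebook API", "facebook api", "FB API", "fb api"]),
  ("twitter", ["twitter api", "Twitter API"]),
  ("winapi", ["Winapi", "win api", "WINAPI", "win32 api", "Windows API", "The Windows API"]),
  ("gmail", ["Google GMail api", "Gmail API"]),
  ("java", ["Java api", "Java API"]),
  ("youtube", ["YouTube API"]),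
  ("googleplaces", ["Google Places API"]),
  ("instagram", ["instagram api", "Instagram API"]),
  ("youtube", ["youtube api"]),
  ("", [""]),
  ("googlecalendar", ["google calendar api"]),
  ("dropbox", ["dropbox api"]),
  ("slack", ["slack api"]),
  ("heresdk", ["HERE sdk"])]

def topicDict : List (String × List String) :=
[
  ("API security", ["security"]),
  ("oauth configuration", ["oauth", "authentication", "configuration", "settings"]),
  ("oauth clarification", ["oauth"]),
  ("api constraints", ["restrictions"]),
  ("possibility of a functionality", ["possible", "feasible", "doable"]),
  ("understanding usage limitation", ["limited", "restricted", "impossible"]),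
  ("debugging", ["debug", "fix", "error", "bug"]),
  ("request", ["request", "call", "invocation"]),
  ("behaviour", ["behaviour"]),
  ("parameters", ["param", "parameter"]),
  ("returned data", ["returned", "requested", "data"]),
  ("settings", ["settings", "configuration"]),
  ("usage", ["usage", "use", "example"]),
  ("understanding functionality", ["how to", "need to", "know"]),
  ("seeking alternative implementation", ["alternative", "way", "another"]),
  ("development environment", ["environment", "development", "development-mode"]),
  ("examples", ["example", "code"]),
  ("documentation", ["documentation", "docs", "reference"]),
  ("redirection", ["redirect"]),
  ("reporting issues", ["typo", "mistake", "error"]),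
  ("definition", ["definition"]),
  ("design patterns", ["design", "design-pattern", "design-patterns"]),
  ("version management", ["version"]),
  ("setting parameters", ["setting", "parameter"]),
  ("recommendation", ["recommend"])]

-- ===== PORT A =====
-- the body of A's inner 'for key in item[keywords]' loop
def keyStep (acc : List String) (key : String) : List String :=
  if key ≠ "" then acc ++ [PySem.Str.lower key] else acc

-- one iteration of A's 'for item in api_dict' loop (name guarded by 'if item[name]:')
def apiStep (acc : List String) (item : String × List String) : List String :=
  item.2.foldl keyStep (if item.1 ≠ "" then acc ++ [PySem.Str.lower item.1] else acc)

-- one iteration of A's 'for item in topic_dict' loop (name appended unconditionally)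
def topicStep (acc : List String) (item : String × List String) : List String :=
  item.2.foldl keyStep (acc ++ [PySem.Str.lower item.1])

def check_bdsl_string (dsl_string : String) : List String × List String × List String :=
  let tokens := PySem.Chars.splitOn dsl_string.toList [' ']   -- dsl_string.split(' ')
  let api_dict_temp : List String := apiDict.foldl apiStep []
  let topics_dict_temp : List String := topicDict.foldl topicStep []
  tokens.foldl (fun st one_item =>
      let user_keyword := String.ofList (one_item.filter PySem.Chars.isalnum)  -- ''.join(filter(str.isalnum, one_item))
      match PySem.List.pyGet? one_item 0 with   -- one_item[0]; none = IndexError, excluded by Pre_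
      | none => st
      | some operator =>
        let st := if topics_dict_temp.contains user_keyword && operator == '/' then
                    (st.1 ++ [user_keyword], st.2.1, st.2.2) else st
        let st := if api_dict_temp.contains user_keyword && operator == '/' then
                    (st.1, st.2.1 ++ [user_keyword], st.2.2) else st
        if operator == '-' then (st.1, st.2.1, st.2.2 ++ [user_keyword]) else st)
    ([], [], [])

-- ===== PORT B =====
-- does the token match this topic entry? (name, or one of the nonempty keywords)
def topicEntryMatch (uk : String) (item : String × List String) : Bool :=
  uk == PySem.Str.lower item.1 || item.2.any (fun k => k ≠ "" && uk == PySem.Str.lower k)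

-- does the token match this api entry? (nonempty name, or one of the nonempty keywords)
def apiEntryMatch (uk : String) (item : String × List String) : Bool :=
  (item.1 ≠ "" && uk == PySem.Str.lower item.1) || item.2.any (fun k => k ≠ "" && uk == PySem.Str.lower k)

def check_bdsl_string_alt (dsl_string : String) : List String × List String × List String :=
  (PySem.Chars.splitOn dsl_string.toList [' ']).foldl (fun st one_item =>
      let uk := String.ofList (one_item.filter PySem.Chars.isalnum)
      match PySem.List.pyGet? one_item 0 with   -- one_item[0]; none = IndexError, excluded by Pre_
      | none => st
      | some op =>
        if op == '/' then
          let st := if topicDict.any (topicEntryMatch uk) then (st.1 ++ [uk], st.2.1, st.2.2) else st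
          if apiDict.any (apiEntryMatch uk) then (st.1, st.2.1 ++ [uk], st.2.2) else st
        else if op == '-' then (st.1, st.2.1, st.2.2 ++ [uk]) else st)
    ([], [], [])

-- ===== PRECONDITION & SPEC =====
-- Pre_ excludes exactly the inputs where Python A raises IndexError at one_item[0]: some token
-- of dsl_string.split(' ') is empty (empty string, leading/trailing space, two adjacent spaces).
def Pre_check_bdsl_string (dsl_string : String) : Prop :=
  ∀ t ∈ PySem.Chars.splitOn dsl_string.toList [' '], t ≠ []
instance (dsl_string : String) : Decidable (Pre_check_bdsl_string dsl_string) := by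
  unfold Pre_check_bdsl_string; infer_instance
def pvWitness_check_bdsl_string : String := "/oauth -error /facebook"
def Spec_check_bdsl_string (dsl_string : String) (out : List String × List String × List String) : Prop := out = check_bdsl_string_alt dsl_string
instance (dsl_string : String) (out : List String × List String × List String) : Decidable (Spec_check_bdsl_string dsl_string out) := by unfold Spec_check_bdsl_string; infer_instance

-- ===== CLAIM (what is proved, stated in full; the proofs are below) =====
def Claim_equal_check_bdsl_string : Prop := ∀ (dsl_string : String), Dom_check_bdsl_string dsl_string → Pre_check_bdsl_string dsl_string → Spec_check_bdsl_string dsl_string (check_bdsl_string dsl_string)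

-- ===== LEMMAS AND PROOFS =====

-- A's flattened view of one entry: the (lowercased) name when nonempty, then the nonempty keywords.
def apiEntryFlat (item : String × List String) : List String :=
  (if item.1 ≠ "" then [PySem.Str.lower item.1] else []) ++ (item.2.filter (fun k => !(k == ""))).map PySem.Str.lower

def topicEntryFlat (item : String × List String) : List String :=
  PySem.Str.lower item.1 :: (item.2.filter (fun k => !(k == ""))).map PySem.Str.lower

lemma keys_fold (ks : List String) (acc : List String) :
    ks.foldl keyStep acc = acc ++ (ks.filter (fun k => !(k == ""))).map PySem.Str.lower := by
  induction ks generalizing acc with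
  | nil => simp
  | cons k ks ih =>
    by_cases h : k = ""
    · simpa [keyStep, h] using ih acc
    · simpa [keyStep, h] using ih (acc ++ [PySem.Str.lower k])

lemma api_temp_eq (d : List (String × List String)) (acc : List String) :
    d.foldl apiStep acc = acc ++ d.flatMap apiEntryFlat := by
  induction d generalizing acc with
  | nil => simp
  | cons item d ih =>
    by_cases h : item.1 = ""
    · simpa [apiStep, keys_fold, apiEntryFlat, h] using
        ih (item.2.foldl keyStep acc)
    · simpa [apiStep, keys_fold, apiEntryFlat, h] using
        ih (item.2.foldl keyStep (acc ++ [PySem.Str.lower item.1]))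

lemma topic_temp_eq (d : List (String × List String)) (acc : List String) :
    d.foldl topicStep acc = acc ++ d.flatMap topicEntryFlat := by
  induction d generalizing acc with
  | nil => simp
  | cons item d ih =>
    simpa [topicStep, keys_fold, topicEntryFlat] using
      ih (item.2.foldl keyStep (acc ++ [PySem.Str.lower item.1]))

lemma keys_contains (uk : String) (ks : List String) :
    ((ks.filter (fun k => !(k == ""))).map PySem.Str.lower).contains uk
      = ks.any (fun k => k ≠ "" && uk == PySem.Str.lower k) := by
  induction ks with
  | nil => simp
  | cons k ks ih =>
    by_cases h : k = ""
    · rw [List.filter_cons, if_neg (by simp [h]), List.any_cons, ih]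
      simp [h]
    · rw [List.filter_cons, if_pos (by simp [h]), List.map_cons, List.contains_cons,
          List.any_cons, ih]
      simp [h]

lemma apiEntryFlat_contains (uk : String) (item : String × List String) :
    (apiEntryFlat item).contains uk = apiEntryMatch uk item := by
  by_cases h : item.1 = ""
  · rw [show apiEntryFlat item = (item.2.filter (fun k => !(k == ""))).map PySem.Str.lower from
        by simp [apiEntryFlat, h]]
    rw [keys_contains]
    simp [apiEntryMatch, h]
  · rw [show apiEntryFlat item
        = PySem.Str.lower item.1 :: (item.2.filter (fun k => !(k == ""))).map PySem.Str.lower from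
        by simp [apiEntryFlat, h]]
    rw [List.contains_cons, keys_contains]
    simp [apiEntryMatch, h]

lemma topicEntryFlat_contains (uk : String) (item : String × List String) :
    (topicEntryFlat item).contains uk = topicEntryMatch uk item := by
  rw [topicEntryFlat, List.contains_cons, keys_contains]
  simp [topicEntryMatch]

lemma api_contains (uk : String) (d : List (String × List String)) :
    (d.flatMap apiEntryFlat).contains uk = d.any (apiEntryMatch uk) := by
  induction d with
  | nil => simp
  | cons item d ih =>
    rw [List.flatMap_cons, List.contains_append, apiEntryFlat_contains, ih, List.any_cons]

lemma topic_contains (uk : String) (d : List (String × List String)) :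
    (d.flatMap topicEntryFlat).contains uk = d.any (topicEntryMatch uk) := by
  induction d with
  | nil => simp
  | cons item d ih =>
    rw [List.flatMap_cons, List.contains_append, topicEntryFlat_contains, ih, List.any_cons]

lemma loop_eq (toks : List (List Char)) (st : List String × List String × List String)
    (h : ∀ t ∈ toks, t ≠ []) :
    toks.foldl (fun st one_item =>
      let user_keyword := String.ofList (one_item.filter PySem.Chars.isalnum)
      match PySem.List.pyGet? one_item 0 with
      | none => st
      | some operator =>
        let st := if (topicDict.flatMap topicEntryFlat).contains user_keyword && operator == '/' then
                    (st.1 ++ [user_keyword], st.2.1, st.2.2) else st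
        let st := if (apiDict.flatMap apiEntryFlat).contains user_keyword && operator == '/' then
                    (st.1, st.2.1 ++ [user_keyword], st.2.2) else st
        if operator == '-' then (st.1, st.2.1, st.2.2 ++ [user_keyword]) else st) st
    = toks.foldl (fun st one_item =>
      let uk := String.ofList (one_item.filter PySem.Chars.isalnum)
      match PySem.List.pyGet? one_item 0 with
      | none => st
      | some op =>
        if op == '/' then
          let st := if topicDict.any (topicEntryMatch uk) then (st.1 ++ [uk], st.2.1, st.2.2) else st
          if apiDict.any (apiEntryMatch uk) then (st.1, st.2.1 ++ [uk], st.2.2) else st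
        else if op == '-' then (st.1, st.2.1, st.2.2 ++ [uk]) else st) st := by
  induction toks generalizing st with
  | nil => rfl
  | cons t toks ih =>
    have ht : t ≠ [] := h t (by simp)
    have h' : ∀ u ∈ toks, u ≠ [] := fun u hu => h u (by simp [hu])
    obtain ⟨c, cs, rfl⟩ : ∃ c cs, t = c :: cs := by
      cases t with
      | nil => exact absurd rfl ht
      | cons c cs => exact ⟨c, cs, rfl⟩
    simp only [List.foldl_cons, PySem.List.pyGet?_zero_cons]
    rw [ih _ h']
    congr 1
    simp only [topic_contains, api_contains]
    by_cases h1 : c = '/'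
    · subst h1
      cases h2 : topicDict.any (topicEntryMatch (String.ofList (List.filter PySem.Chars.isalnum ('/' :: cs)))) <;>
        cases h3 : apiDict.any (apiEntryMatch (String.ofList (List.filter PySem.Chars.isalnum ('/' :: cs)))) <;>
          simp [h2, h3]
    · by_cases h4 : c = '-'
      · subst h4
        have e1 : (('-' : Char) == '/') = false := by decide
        have e2 : (('-' : Char) == '-') = true := by decide
        simp [e1, e2]
      · have e1 : (c == '/') = false := by simp [h1]
        have e2 : (c == '-') = false := by simp [h4]
        simp [e1, e2]

-- ===== VERDICT (by name: the statement is the Claim_ definition above) =====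
theorem check_bdsl_string_spec : Claim_equal_check_bdsl_string := by
  intro s _ hpre
  unfold Pre_check_bdsl_string at hpre
  unfold Spec_check_bdsl_string check_bdsl_string check_bdsl_string_alt
  simp only [api_temp_eq, topic_temp_eq, List.nil_append]
  exact loop_eq _ _ hpre
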